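-- pv_equiv track=rewrite | github.com/leetcode-notes/CSE20-Projects | Assignment_3/Substring.py | checkLongestNum
-- ===== SOURCE A (Python) =====
-- def checkLongestNum(inp):
--     assert type(inp) == str
--     new = inp.split('0')
--     max = 0
--     for i in new:
--         if len(i)>max:
--             max = len(i)
--     return max
-- ===== SOURCE B (Python) =====
-- def checkLongestNum(inp):
--     assert type(inp) == str
--     best = 0
--     cur = 0
--     for c in inp:
--         if c == '0':
--             cur = 0
--         else:
--             cur += 1
--             if cur > best:
--                 best = cur
--     return best
-- ===== Notes on version B (the rewrite author's own statement) =====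
-- stated objective: simpler
-- what changed: Replaces splitting the string on the zero character plus a second pass over the resulting pieces with a single pass over the characters that keeps a running run-length counter and its maximum; no intermediate list is built.
import Mathlib
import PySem

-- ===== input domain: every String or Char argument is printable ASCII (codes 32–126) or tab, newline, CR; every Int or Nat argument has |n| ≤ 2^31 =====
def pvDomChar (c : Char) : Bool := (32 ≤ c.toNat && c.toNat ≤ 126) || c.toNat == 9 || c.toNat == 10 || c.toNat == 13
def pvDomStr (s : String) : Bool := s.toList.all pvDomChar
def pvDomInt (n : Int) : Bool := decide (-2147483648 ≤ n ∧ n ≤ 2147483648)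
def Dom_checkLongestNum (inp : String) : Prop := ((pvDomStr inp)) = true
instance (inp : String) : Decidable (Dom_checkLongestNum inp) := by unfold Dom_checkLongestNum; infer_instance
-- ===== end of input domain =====

-- B replaces split('0') + a second pass over the pieces by a single pass with a running counter (simpler).

-- ===== PORT A =====
-- inp.split('0') then scan the pieces for the largest length
def checkLongestNum (inp : String) : Int :=
  let new := PySem.Chars.splitOn inp.toList ['0']
  new.foldl (fun m i => if (PySem.Chars.len i : Int) > m then (PySem.Chars.len i : Int) else m) 0

-- ===== PORT B =====
-- one pass: reset the run counter at '0', otherwise bump it and update the best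
def checkLongestNum_alt (inp : String) : Int :=
  (inp.toList.foldl (fun (s : Int × Int) c =>
      if c = '0' then (s.1, 0)
      else
        let cur := s.2 + 1
        ((if cur > s.1 then cur else s.1), cur)) ((0 : Int), (0 : Int))).1

-- ===== PRECONDITION & SPEC =====
def Spec_checkLongestNum (inp : String) (out : Int) : Prop := out = checkLongestNum_alt inp
instance (inp : String) (out : Int) : Decidable (Spec_checkLongestNum inp out) := by unfold Spec_checkLongestNum; infer_instance

-- ===== CLAIM (what is proved, stated in full; the proofs are below) =====
def Claim_equal_checkLongestNum : Prop := ∀ (inp : String), Dom_checkLongestNum inp → Spec_checkLongestNum inp (checkLongestNum inp)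

-- ===== LEMMAS AND PROOFS =====

-- a clean structural form of split on the single character '0'
def mySplit : List Char → List (List Char)
  | [] => [[]]
  | c :: cs => if c = '0' then [] :: mySplit cs
               else match mySplit cs with
                    | [] => [[c]]
                    | h :: t => (c :: h) :: t

def consHead (x : List Char) : List (List Char) → List (List Char)
  | [] => [x]
  | p :: ps => (x ++ p) :: ps

theorem mySplit_ne_nil (cs : List Char) : mySplit cs ≠ [] := by
  cases cs with
  | nil => simp [mySplit]
  | cons c cs => simp only [mySplit]; split_ifs; · simp
                 · cases h : mySplit cs <;> simp

theorem consHead_nil_of_ne (ps : List (List Char)) (h : ps ≠ []) : consHead [] ps = ps := by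
  cases ps with
  | nil => exact absurd rfl h
  | cons p ps => simp [consHead]

theorem splitOn_go_spec : ∀ (fuel : Nat) (l cur : List Char) (acc : List (List Char)),
    l.length < fuel →
    PySem.Chars.splitOn.go ['0'] fuel l cur acc = acc.reverse ++ consHead cur.reverse (mySplit l) := by
  intro fuel
  induction fuel with
  | zero => intro l cur acc h; omega
  | succ n ih =>
    intro l cur acc h
    cases l with
    | nil => simp [PySem.Chars.splitOn.go, mySplit, consHead]
    | cons c rest =>
      simp only [PySem.Chars.splitOn.go]
      by_cases hc : c = '0'
      · subst hc
        rw [if_pos (by simp [List.isPrefixOf])]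
        simp only [List.length_cons] at h
        rw [ih _ _ _ (by simpa using Nat.lt_of_succ_lt_succ h)]
        simp only [List.length_singleton, List.drop_succ_cons, List.drop_zero,
          List.reverse_nil, List.reverse_cons, List.append_assoc, List.singleton_append]
        rw [consHead_nil_of_ne _ (mySplit_ne_nil rest)]
        rw [show mySplit ('0' :: rest) = [] :: mySplit rest from by simp [mySplit]]
        simp [consHead]
      · rw [if_neg (by simp only [List.isPrefixOf, Bool.and_true,
          beq_iff_eq]; exact fun hh => hc hh.symm)]
        simp only [List.length_cons] at h
        rw [ih _ _ _ (Nat.lt_of_succ_lt_succ h)]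
        simp only [mySplit, if_neg hc]
        cases hms : mySplit rest with
        | nil => exact absurd hms (mySplit_ne_nil rest)
        | cons p ps => simp [consHead]

theorem splitOn_eq_mySplit (cs : List Char) :
    PySem.Chars.splitOn cs ['0'] = mySplit cs := by
  unfold PySem.Chars.splitOn
  rw [splitOn_go_spec (cs.length + 1) cs [] [] (by omega)]
  simp [consHead_nil_of_ne _ (mySplit_ne_nil cs)]

def aStep (m : Int) (i : List Char) : Int := if (PySem.Chars.len i : Int) > m then (PySem.Chars.len i : Int) else m

def bStep (s : Int × Int) (c : Char) : Int × Int :=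
  if c = '0' then (s.1, 0)
  else
    let cur := s.2 + 1
    ((if cur > s.1 then cur else s.1), cur)

-- "bump c" adds the pending run length c into the first piece
def bump (c : Int) : List (List Char) → List Int
  | [] => []
  | p :: ps => (c + p.length) :: ps.map (fun q => (q.length : Int))

theorem key (cs : List Char) : ∀ (b c : Int), 0 ≤ c → c ≤ b →
    (cs.foldl bStep (b, c)).1
      = (bump c (mySplit cs)).foldl (fun m x => if x > m then x else m) b := by
  induction cs with
  | nil =>
    intro b c _ hcb
    simp only [List.foldl_nil, mySplit, bump, List.length_nil, Nat.cast_zero, add_zero,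
      List.map_nil, List.foldl_cons]
    rw [if_neg (by omega : ¬ c > b)]
  | cons ch cs ih =>
    intro b c hc hcb
    by_cases hch : ch = '0'
    · subst hch
      simp only [List.foldl_cons, bStep, reduceIte]
      rw [ih b 0 le_rfl (le_trans hc hcb)]
      rw [show mySplit ('0' :: cs) = [] :: mySplit cs from by simp [mySplit]]
      cases hms : mySplit cs with
      | nil => exact absurd hms (mySplit_ne_nil cs)
      | cons p ps =>
        simp only [bump, List.length_nil, Nat.cast_zero, add_zero, List.map_cons,
          List.foldl_cons, zero_add]
        rw [if_neg (by omega : ¬ c > b)]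
    · simp only [List.foldl_cons, bStep, if_neg hch]
      set b' : Int := if c + 1 > b then c + 1 else b with hb'
      have hb'ge : c + 1 ≤ b' := by rw [hb']; split_ifs <;> omega
      rw [ih b' (c + 1) (by omega) hb'ge]
      simp only [mySplit, if_neg hch]
      cases hms : mySplit cs with
      | nil => exact absurd hms (mySplit_ne_nil cs)
      | cons p ps =>
        simp only [bump, List.length_cons, List.foldl_cons]
        push_cast
        have hpl : (0:Int) ≤ (p.length : Int) := Int.natCast_nonneg _
        have : (if c + 1 + (p.length : Int) > b' then c + 1 + (p.length : Int) else b')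
             = (if c + ((p.length : Int) + 1) > b then c + ((p.length : Int) + 1) else b) := by
          rw [hb']; split_ifs <;> omega
        rw [this]

theorem afold_map (ps : List (List Char)) : ∀ (m : Int),
    List.foldl aStep m ps
      = List.foldl (fun m x => if x > m then x else m) m (ps.map (fun q => (q.length : Int))) := by
  induction ps with
  | nil => intro m; rfl
  | cons p ps ih => intro m; simp only [List.map_cons, List.foldl_cons, aStep, PySem.Chars.len]; exact ih _

-- ===== VERDICT (by name: the statement is the Claim_ definition above) =====
theorem checkLongestNum_spec : Claim_equal_checkLongestNum := by
  intro inp _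
  show checkLongestNum inp = checkLongestNum_alt inp
  have hA : checkLongestNum inp
      = List.foldl aStep 0 (PySem.Chars.splitOn inp.toList ['0']) := rfl
  have hB : checkLongestNum_alt inp
      = (List.foldl bStep ((0 : Int), (0 : Int)) inp.toList).1 := rfl
  rw [hA, hB, splitOn_eq_mySplit, key inp.toList 0 0 le_rfl le_rfl]
  cases hms : mySplit inp.toList with
  | nil => exact absurd hms (mySplit_ne_nil inp.toList)
  | cons p ps =>
    rw [afold_map]
    simp [bump]
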